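-- pv_equiv track=rewrite | github.com/Naloam/ScholarFLow | backend/services/autoresearch/benchmarks.py | _normalize_topic_tokens
-- ===== SOURCE A (Python) =====
-- def _normalize_topic_tokens(topic: str | None) -> set[str]:
--     if not topic:
--         return set()
--     return {
--         token
--         for token in "".join(character.lower() if character.isalnum() else " " for character in topic).split()
--         if len(token) >= 2
--     }
-- ===== SOURCE B (Python) =====
-- def _normalize_topic_tokens(topic):
--     if not topic:
--         return set()
--     tokens = set()
--     buffer = []
--     for character in topic:
--         if character.isalnum():
--             buffer.append(character.lower())
--         else:
--             if len(buffer) >= 2: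
--                 tokens.add("".join(buffer))
--             buffer = []
--     if len(buffer) >= 2:
--         tokens.add("".join(buffer))
--     return tokens
-- ===== Notes on version B (the rewrite author's own statement) =====
-- stated objective: alternative
-- what changed: Replaces the build-a-masked-copy-then-str.split pipeline (join of per-char map, split, set comprehension) with a single-pass character tokenizer that accumulates a lowered buffer and flushes tokens of length >= 2 at non-alphanumeric boundaries.
import Mathlib
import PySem

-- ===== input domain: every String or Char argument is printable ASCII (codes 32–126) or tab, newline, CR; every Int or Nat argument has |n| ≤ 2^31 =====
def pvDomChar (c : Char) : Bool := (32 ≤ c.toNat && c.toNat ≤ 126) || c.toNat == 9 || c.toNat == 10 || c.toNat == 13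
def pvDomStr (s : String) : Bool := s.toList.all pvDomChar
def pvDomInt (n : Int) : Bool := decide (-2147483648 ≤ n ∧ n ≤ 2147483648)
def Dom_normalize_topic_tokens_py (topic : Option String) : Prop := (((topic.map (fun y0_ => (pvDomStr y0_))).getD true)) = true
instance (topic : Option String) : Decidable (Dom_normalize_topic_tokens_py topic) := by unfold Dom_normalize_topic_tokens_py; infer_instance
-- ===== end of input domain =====

-- B replaces A's masked-copy + str.split pipeline by a single-pass buffered tokenizer (alternative decomposition, same cost).

-- ===== PORT A =====
-- A: if not topic: return set(); mask non-alnum chars to ' ', lower the rest, split on whitespace, keep tokens of length >= 2 as a set.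
def normalize_topic_tokens_py (topic : Option String) : List String :=
  match topic with
  | none => PySem.Set.empty
  | some t =>
    if t = "" then PySem.Set.empty
    else
      let joined : List Char :=
        t.toList.map (fun c => if PySem.Chars.isalnum c then PySem.Chars.lowerChar c else ' ')
      PySem.Set.ofList
        (((PySem.Chars.split₀ joined).filter (fun tok => 2 ≤ tok.length)).map String.ofList)

-- ===== PORT B =====
-- flush: add the buffered token to the set if it has length >= 2
def pvFlush (acc : PySem.Set String) (buf : List Char) : PySem.Set String :=
  if 2 ≤ buf.length then PySem.Set.add acc (String.ofList buf) else acc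

-- the single pass over the characters of topic
def pvScan : List Char → PySem.Set String → List Char → PySem.Set String
  | [], acc, buf => pvFlush acc buf
  | c :: rest, acc, buf =>
    if PySem.Chars.isalnum c then pvScan rest acc (buf ++ [PySem.Chars.lowerChar c])
    else pvScan rest (pvFlush acc buf) []

def normalize_topic_tokens_py_alt (topic : Option String) : List String :=
  match topic with
  | none => PySem.Set.empty
  | some t =>
    if t = "" then PySem.Set.empty
    else pvScan t.toList PySem.Set.empty []

-- ===== PRECONDITION & SPEC =====
def Spec_normalize_topic_tokens_py (topic : Option String) (out : List String) : Prop := out = normalize_topic_tokens_py_alt topic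
instance (topic : Option String) (out : List String) : Decidable (Spec_normalize_topic_tokens_py topic out) := by unfold Spec_normalize_topic_tokens_py; infer_instance

-- ===== CLAIM (what is proved, stated in full; the proofs are below) =====
def Claim_equal_normalize_topic_tokens_py : Prop := ∀ (topic : Option String), Dom_normalize_topic_tokens_py topic → Spec_normalize_topic_tokens_py topic (normalize_topic_tokens_py topic)

-- ===== LEMMAS AND PROOFS =====

-- lowering an alphanumeric character never yields a whitespace character
theorem pv_isspace_lower_of_isalnum (c : Char) (h : PySem.Chars.isalnum c = true) :
    PySem.Chars.isspace (PySem.Chars.lowerChar c) = false := by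
  unfold PySem.Chars.isalnum PySem.Chars.isalpha PySem.Chars.isdigit PySem.Chars.isupper
    PySem.Chars.islower at h
  unfold PySem.Chars.lowerChar PySem.Chars.isupper PySem.Chars.isspace
  simp only [Bool.or_eq_true, Bool.and_eq_true, decide_eq_true_eq, Char.le_def,
    UInt32.le_iff_toNat_le, Char.toNat_val, show 'A'.toNat = 65 from rfl,
    show 'Z'.toNat = 90 from rfl, show 'a'.toNat = 97 from rfl, show 'z'.toNat = 122 from rfl,
    show '0'.toNat = 48 from rfl, show '9'.toNat = 57 from rfl] at h ⊢
  split_ifs with hu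
  · have hv : (Char.ofNat (c.toNat + 32)).toNat = c.toNat + 32 := by
      rw [Char.toNat_ofNat, if_pos]
      exact Or.inl (by omega)
    rw [hv]
    simp only [Bool.or_eq_false_iff, Bool.and_eq_false_iff, decide_eq_false_iff_not]
    omega
  · simp only [not_and, not_le] at hu
    simp only [Bool.or_eq_false_iff, Bool.and_eq_false_iff, decide_eq_false_iff_not]
    omega

-- the accumulator of split₀.go only prepends already-finished tokens
theorem pv_go_acc (s : List Char) : ∀ cur accR,
    PySem.Chars.split₀.go s cur accR = accR.reverse ++ PySem.Chars.split₀.go s cur [] := by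
  induction s with
  | nil =>
    intro cur accR
    simp [PySem.Chars.split₀.go]
    split_ifs <;> simp
  | cons c rest ih =>
    intro cur accR
    simp only [PySem.Chars.split₀.go]
    split_ifs with h1 h2
    · exact ih [] accR
    · rw [ih [] (cur.reverse :: accR), ih [] [cur.reverse]]
      simp
    · exact ih (c :: cur) accR

-- main invariant: the scan over the raw characters equals folding Set.add over the
-- length-filtered tokens of the masked character list, continuing from buffer `buf`
theorem pv_scan_eq (s : List Char) : ∀ (acc : PySem.Set String) (buf : List Char),
    pvScan s acc buf =
      List.foldl PySem.Set.add acc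
        (((PySem.Chars.split₀.go
              (s.map (fun c => if PySem.Chars.isalnum c then PySem.Chars.lowerChar c else ' '))
              buf.reverse []).filter (fun tok => 2 ≤ tok.length)).map String.ofList) := by
  induction s with
  | nil =>
    intro acc buf
    simp only [List.map_nil, PySem.Chars.split₀.go, pvScan]
    rcases buf with _ | ⟨b, bs⟩
    · simp [pvFlush]
    · rw [if_neg (by simp)]
      simp only [List.reverse_reverse, pvFlush]
      by_cases h : 1 ≤ bs.length <;> simp [List.filter, h]
  | cons c rest ih =>
    intro acc buf
    simp only [List.map_cons, PySem.Chars.split₀.go, pvScan]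
    by_cases ha : PySem.Chars.isalnum c = true
    · rw [if_pos ha, if_pos ha, if_neg (by simp [pv_isspace_lower_of_isalnum c ha])]
      rw [ih acc (buf ++ [PySem.Chars.lowerChar c])]
      simp
    · rw [if_neg ha, if_neg ha, if_pos (by decide)]
      rcases buf with _ | ⟨b, bs⟩
      · simp only [List.reverse_nil, List.isEmpty_nil, if_pos]
        rw [ih (pvFlush acc []) []]
        simp [pvFlush]
      · simp only [List.reverse_reverse]
        rw [if_neg (by simp), pv_go_acc, ih (pvFlush acc (b :: bs)) []]
        simp only [List.reverse_cons, List.reverse_nil, List.nil_append, List.filter_append,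
          List.map_append, List.foldl_append]
        simp [pvFlush, List.filter]
        split_ifs with h
        · simp [h]
        · simp [h]

-- ===== VERDICT (by name: the statement is the Claim_ definition above) =====
theorem normalize_topic_tokens_py_spec : Claim_equal_normalize_topic_tokens_py := by
  intro topic _
  unfold Spec_normalize_topic_tokens_py
  rcases topic with _ | t
  · rfl
  · by_cases h : t = ""
    · simp [normalize_topic_tokens_py, normalize_topic_tokens_py_alt, h]
    · simp only [normalize_topic_tokens_py, normalize_topic_tokens_py_alt, if_neg h]
      rw [pv_scan_eq]
      rfl
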